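-- pv_equiv track=rewrite | github.com/aikenkyu001/llm_complexity_benchmark | 01_TestDefinitions/BitmaskGrouper/solution.py | groupNums
-- ===== SOURCE A (Python) =====
-- from typing import List
--
-- def groupNums(nums: List[int]) -> List[List[int]]:
--     # Sort nums in descending order based on their bit count
--     nums.sort(key=lambda x: bin(x).count('1'), reverse=True)
--
--     groups = []
--     while nums:
--         # Start a new group with the first element
--         current_group = [nums.pop(0)]
--
--         # Try to add more elements to the current group
--         i = 0
--         while i < len(nums):
--             if all(num & current_group[0] != 0 for num in current_group):
--                 current_group.append(nums.pop(i))
--             else: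
--                 i += 1
--
--         groups.append(current_group)
--
--     return groups
-- ===== SOURCE B (Python) =====
-- from typing import List
--
-- def groupNums(nums: List[int]) -> List[List[int]]:
--     # Sort by popcount, most set bits first, then split into segments in one
--     # forward pass: a segment grows while elements share a bit with its head;
--     # the first element failing that test (possibly the head itself, when it
--     # is 0) still belongs to the segment and closes it.
--     order = sorted(nums, key=lambda x: bin(x).count('1'), reverse=True)
--     n = len(order)
--     groups = []
--     i = 0
--     while i < n:
--         h = order[i]
--         j = i
--         while j < n and order[j] & h:
--             j += 1
--         if j < n:
--             j += 1
--         groups.append(order[i:j])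
--         i = j
--     return groups
-- ===== Notes on version B (the rewrite author's own statement) =====
-- stated objective: faster
-- what changed: Replaced the destructive pop(0)/pop(i) loop that re-scans the whole growing group with all() at every step by a sort plus a single forward index pass that cuts the sorted list into segments by one uniform closing rule; no per-step group re-scan and no O(n) pops.
import Mathlib
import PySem

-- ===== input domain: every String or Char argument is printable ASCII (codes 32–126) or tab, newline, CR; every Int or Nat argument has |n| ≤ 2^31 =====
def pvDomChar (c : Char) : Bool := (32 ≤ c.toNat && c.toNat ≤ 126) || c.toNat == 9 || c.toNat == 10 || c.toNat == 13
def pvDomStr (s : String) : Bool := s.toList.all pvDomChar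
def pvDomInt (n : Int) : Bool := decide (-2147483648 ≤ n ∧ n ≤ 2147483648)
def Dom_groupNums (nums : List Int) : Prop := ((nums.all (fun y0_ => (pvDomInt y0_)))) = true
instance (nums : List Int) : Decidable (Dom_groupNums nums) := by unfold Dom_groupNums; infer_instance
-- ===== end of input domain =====

-- B replaces A's pop/re-scan grouping loop by one forward index pass over the sorted list
-- (measured faster). Equivalence is about the RETURN value only: A sorts and empties the
-- argument list in place, B leaves it untouched.
-- (While-loops are transcribed with a structural Nat fuel that provably suffices — a totality
-- guard only, never changing the computation.)

-- ===== PORT A =====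
-- all(num & current_group[0] != 0 for num in current_group)
def pvAllLand (group : List Int) (g0 : Int) : Bool :=
  group.all (fun num => decide (PySem.Int.band num g0 ≠ 0))

-- inner 'while i < len(nums)' loop; state = (current_group, nums, i); each step decreases
-- len(nums) - i, so fuel = len(nums) suffices
def pvInnerA (g0 : Int) (fuel : Nat) (group : List Int) (nums : List Int) (i : Nat) :
    List Int × List Int :=
  match fuel with
  | 0 => (group, nums)
  | fuel + 1 =>
    if i < nums.length then
      if pvAllLand group g0 then
        match PySem.List.pop? nums (i : Int) with
        | some r => pvInnerA g0 fuel (group ++ [r.1]) r.2 i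
        | none => (group, nums)   -- unreachable: i < len(nums)
      else
        pvInnerA g0 fuel group nums (i + 1)
    else
      (group, nums)

-- outer 'while nums' loop; every iteration consumes at least the head, so fuel = len(nums)
def pvOuterA (fuel : Nat) (nums : List Int) (groups : List (List Int)) : List (List Int) :=
  match fuel with
  | 0 => groups
  | fuel + 1 =>
    match nums with
    | [] => groups
    | g0 :: rest =>
        match pvInnerA g0 rest.length [g0] rest 0 with
        | (grp, rest2) => pvOuterA fuel rest2 (groups ++ [grp])

def groupNums (nums : List Int) : List (List Int) :=
  pvOuterA nums.length (PySem.List.sorted nums (fun x => PySem.Int.bitCount x) true) []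

-- ===== PORT B =====
-- inner 'while j < n and order[j] & h' scan; j only grows, so fuel = n - j at entry suffices
-- (j is a Nat known < n when indexing, so List.getD is exact for order[j])
def pvScanB (order : List Int) (h : Int) : Nat → Nat → Nat
  | 0, j => j
  | fuel + 1, j =>
    if j < order.length ∧ PySem.Int.band (order.getD j 0) h ≠ 0 then
      pvScanB order h fuel (j + 1)
    else j

-- the closing index j' of the segment starting at i: one past the scan unless it hit the end
def pvNextB (order : List Int) (i : Nat) : Nat :=
  if pvScanB order (order.getD i 0) (order.length - i) i < order.length then
    pvScanB order (order.getD i 0) (order.length - i) i + 1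
  else
    pvScanB order (order.getD i 0) (order.length - i) i

-- outer 'while i < n' loop; each segment is nonempty, so fuel = n suffices
def pvLoopB (order : List Int) : Nat → Nat → List (List Int)
  | 0, _ => []
  | fuel + 1, i =>
    if i < order.length then
      PySem.List.slice order (some (i : Int)) (some ((pvNextB order i : Nat) : Int)) ::
        pvLoopB order fuel (pvNextB order i)
    else []

def groupNums_alt (nums : List Int) : List (List Int) :=
  let order := PySem.List.sorted nums (fun x => PySem.Int.bitCount x) true
  pvLoopB order order.length 0

-- ===== PRECONDITION & SPEC =====
def Spec_groupNums (nums : List Int) (out : List (List Int)) : Prop := out = groupNums_alt nums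
instance (nums : List Int) (out : List (List Int)) : Decidable (Spec_groupNums nums out) := by unfold Spec_groupNums; infer_instance

-- ===== CLAIM (what is proved, stated in full; the proofs are below) =====
def Claim_equal_groupNums : Prop := ∀ (nums : List Int), Dom_groupNums nums → Spec_groupNums nums (groupNums nums)

-- ===== LEMMAS AND PROOFS =====
-- Proof-side reference shape: both loops are shown equal to this structural recursion.
def pvSplit (h : Int) : List Int → List Int × List Int
  | [] => ([], [])
  | x :: xs =>
      if PySem.Int.band x h ≠ 0 then
        let r := pvSplit h xs
        (x :: r.1, r.2)
      else
        ([x], xs)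

def pvRefBuild (fuel : Nat) (order : List Int) : List (List Int) :=
  match fuel with
  | 0 => []
  | fuel + 1 =>
    match order with
    | [] => []
    | h :: tail =>
        if h = 0 then
          [h] :: pvRefBuild fuel tail
        else
          match pvSplit h tail with
          | (p, s) => (h :: p) :: pvRefBuild fuel s

-- once the all() condition is false the inner loop only advances i and changes nothing
theorem pvInnerA_stuck (g0 : Int) (fuel : Nat) (group nums : List Int) (i : Nat)
    (hf : pvAllLand group g0 = false) :
    pvInnerA g0 fuel group nums i = (group, nums) := by
  induction fuel generalizing i with
  | zero => rfl
  | succ fuel ih => rw [pvInnerA]; simp [hf, ih]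

-- the remainder from pvSplit never grows
theorem pvSplit_len (h : Int) (xs : List Int) :
    (pvSplit h xs).2.length ≤ xs.length := by
  induction xs with
  | nil => simp [pvSplit]
  | cons x xs ih =>
      by_cases hb : PySem.Int.band x h ≠ 0
      · simp [pvSplit, hb]; omega
      · simp [pvSplit, hb]

-- with enough fuel and the condition holding, the inner loop pops the front: it performs
-- pvSplit, admitting the first non-intersecting element before the re-check rejects more
theorem pvInnerA_split (g0 : Int) (fuel : Nat) (group nums : List Int)
    (hfu : nums.length ≤ fuel) (ht : pvAllLand group g0 = true) :
    pvInnerA g0 fuel group nums 0 =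
      (group ++ (pvSplit g0 nums).1, (pvSplit g0 nums).2) := by
  induction nums generalizing group fuel with
  | nil => cases fuel <;> simp [pvInnerA, pvSplit]
  | cons x xs ih =>
      match fuel, hfu with
      | fuel + 1, hfu =>
        rw [pvInnerA]
        simp only [List.length_cons, Nat.zero_lt_succ, if_true, ht,
          show ((0:Nat):Int) = 0 from rfl, PySem.List.pop?_zero_cons]
        by_cases hb : PySem.Int.band x g0 ≠ 0
        · have ht' : pvAllLand (group ++ [x]) g0 = true := by
            simp [pvAllLand, List.all_append] at ht ⊢; exact ⟨ht, hb⟩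
          rw [ih fuel (group ++ [x]) (by simpa using Nat.lt_succ_iff.mp hfu) ht']
          simp [pvSplit, hb]
        · have hf : pvAllLand (group ++ [x]) g0 = false := by
            simp [pvAllLand, List.all_append]
            intro _; simpa using hb
          rw [pvInnerA_stuck _ _ _ _ _ hf]
          simp [pvSplit, hb]

-- with enough fuel on both sides the outer loop of A builds exactly the reference shape
theorem pvOuterA_build (fuel1 fuel2 : Nat) (nums : List Int) (groups : List (List Int))
    (h1 : nums.length ≤ fuel1) (h2 : nums.length ≤ fuel2) :
    pvOuterA fuel1 nums groups = groups ++ pvRefBuild fuel2 nums := by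
  induction fuel1 generalizing fuel2 nums groups with
  | zero =>
      have : nums = [] := by cases nums <;> simp_all
      subst this; cases fuel2 <;> simp [pvOuterA, pvRefBuild]
  | succ fuel1 ih =>
      match nums with
      | [] => cases fuel2 <;> simp [pvOuterA, pvRefBuild]
      | g0 :: rest =>
        match fuel2, h2 with
        | fuel2 + 1, h2 =>
          rw [pvOuterA, pvRefBuild]
          by_cases h0 : g0 = 0
          · have hf : pvAllLand [g0] g0 = false := by
              simp [pvAllLand, h0]
            rw [pvInnerA_stuck _ _ _ _ _ hf]
            subst h0
            simp only [if_true]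
            rw [ih fuel2 rest (groups ++ [[0]]) (by simpa using Nat.lt_succ_iff.mp h1)
              (by simpa using Nat.lt_succ_iff.mp h2)]
            simp
          · have ht : pvAllLand [g0] g0 = true := by
              simp [pvAllLand, h0]
            rw [pvInnerA_split _ _ _ _ (le_refl _) ht]
            have hs := pvSplit_len g0 rest
            simp only [h0, if_false, List.singleton_append]
            rw [ih fuel2 (pvSplit g0 rest).2 (groups ++ [g0 :: (pvSplit g0 rest).1])
              (by simp at h1 ⊢; omega) (by simp at h2 ⊢; omega)]
            simp

-- pvSplit is a take/drop at one past the intersecting prefix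
theorem pvSplit_take_drop (h : Int) (xs : List Int) :
    pvSplit h xs =
      (xs.take ((xs.takeWhile (fun x => decide (PySem.Int.band x h ≠ 0))).length + 1),
       xs.drop ((xs.takeWhile (fun x => decide (PySem.Int.band x h ≠ 0))).length + 1)) := by
  induction xs with
  | nil => simp [pvSplit]
  | cons x xs ih =>
      by_cases hb : PySem.Int.band x h ≠ 0
      · simp [pvSplit, hb, ih]
      · simp [pvSplit, hb]

-- B's inner scan counts the intersecting prefix of the suffix at j
theorem pvScanB_spec (order : List Int) (h : Int) (fuel j : Nat)
    (hfu : order.length ≤ j + fuel) :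
    pvScanB order h fuel j =
      j + ((order.drop j).takeWhile (fun x => decide (PySem.Int.band x h ≠ 0))).length := by
  induction fuel generalizing j with
  | zero =>
      have : order.drop j = [] := List.drop_eq_nil_of_le (by omega)
      simp [pvScanB, this]
  | succ fuel ih =>
      rw [pvScanB]
      by_cases hj : j < order.length
      · have hd : order.drop j = order[j] :: order.drop (j + 1) :=
          List.drop_eq_getElem_cons hj
        have hget : order.getD j 0 = order[j] := List.getD_eq_getElem order 0 hj
        by_cases hb : PySem.Int.band (order.getD j 0) h ≠ 0
        · have hb' : decide (PySem.Int.band order[j] h ≠ 0) = true :=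
            decide_eq_true (hget ▸ hb)
          rw [if_pos ⟨hj, hb⟩, ih (j + 1) (by omega), hd,
            List.takeWhile_cons, hb']
          simp; omega
        · have hb' : decide (PySem.Int.band order[j] h ≠ 0) = false :=
            decide_eq_false (hget ▸ hb)
          rw [if_neg (by tauto), hd, List.takeWhile_cons, hb']
          simp
      · rw [if_neg (by tauto)]
        have : order.drop j = [] := List.drop_eq_nil_of_le (by omega)
        simp [this]

-- with enough fuel on both sides B's index loop builds the reference shape from position i
theorem pvLoopB_eq_ref (order : List Int) (fuel1 fuel2 i : Nat)
    (h1 : order.length ≤ i + fuel1) (h2 : order.length ≤ i + fuel2) :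
    pvLoopB order fuel1 i = pvRefBuild fuel2 (order.drop i) := by
  induction fuel1 generalizing fuel2 i with
  | zero =>
      have : order.drop i = [] := List.drop_eq_nil_of_le (by omega)
      cases fuel2 <;> simp [pvLoopB, pvRefBuild, this]
  | succ fuel1 ih =>
      rw [pvLoopB]
      by_cases hi : i < order.length
      · have hd : order.drop i = order[i] :: order.drop (i + 1) :=
          List.drop_eq_getElem_cons hi
        have hget : order.getD i 0 = order[i] := List.getD_eq_getElem order 0 hi
        obtain ⟨fuel2', rfl⟩ : ∃ f, fuel2 = f + 1 := ⟨fuel2 - 1, by omega⟩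
        rw [if_pos hi, hd, pvRefBuild]
        have hscan : pvScanB order (order.getD i 0) (order.length - i) i =
            i + ((order.drop i).takeWhile
              (fun x => decide (PySem.Int.band x order[i] ≠ 0))).length := by
          rw [hget]; exact pvScanB_spec order order[i] (order.length - i) i (by omega)
        by_cases h0 : order[i] = 0
        · -- the head shares no bit with itself: singleton segment on both sides
          have hK : ((order.drop i).takeWhile
              (fun x => decide (PySem.Int.band x order[i] ≠ 0))).length = 0 := by
            rw [hd, List.takeWhile_cons,
              decide_eq_false (by simp [h0] :
                ¬(PySem.Int.band order[i] order[i] ≠ 0))]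
            simp
          have hnext : pvNextB order i = i + 1 := by
            unfold pvNextB; rw [hscan, hK, if_pos (by omega : i + 0 < order.length)]
          have hslice : PySem.List.slice order (some (i : Int)) (some ((i + 1 : Nat) : Int))
              = [order[i]] := by
            rw [PySem.List.slice_natCast]
            have hsub : i + 1 - i = 1 := by omega
            rw [hsub, hd, List.take_succ_cons, List.take_zero]
          rw [hnext, if_pos h0, hslice, ih fuel2' (i + 1) (by omega) (by omega)]
        · -- the head intersects itself; the scan crosses it and the intersecting run after it
          have hK : ((order.drop i).takeWhile
              (fun x => decide (PySem.Int.band x order[i] ≠ 0))).length =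
              ((order.drop (i + 1)).takeWhile
                (fun x => decide (PySem.Int.band x order[i] ≠ 0))).length + 1 := by
            rw [hd, List.takeWhile_cons,
              decide_eq_true (by simp [PySem.Int.band_self, h0] :
                PySem.Int.band order[i] order[i] ≠ 0)]
            simp
          set k := ((order.drop (i + 1)).takeWhile
            (fun x => decide (PySem.Int.band x order[i] ≠ 0))).length with hk
          have hkle : k ≤ (order.drop (i + 1)).length :=
            (List.takeWhile_sublist _).length_le
          have hrl : (order.drop (i + 1)).length = order.length - (i + 1) := by simp
          rw [if_neg h0, pvSplit_take_drop, ← hk]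
          by_cases hjn : i + (k + 1) < order.length
          · -- a closing element exists: it joins and ends the segment
            have hnext : pvNextB order i = i + (k + 1) + 1 := by
              unfold pvNextB; rw [hscan, hK, if_pos hjn]
            have hslice : PySem.List.slice order (some (i : Int))
                (some ((i + (k + 1) + 1 : Nat) : Int)) =
                order[i] :: (order.drop (i + 1)).take (k + 1) := by
              rw [PySem.List.slice_natCast]
              have hsub : i + (k + 1) + 1 - i = k + 2 := by omega
              rw [hsub, hd, List.take_succ_cons]
            have hdd : (order.drop (i + 1)).drop (k + 1) = order.drop (i + (k + 1) + 1) := by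
              rw [List.drop_drop]; congr 1; omega
            rw [hnext, hslice, ih fuel2' (i + (k + 1) + 1) (by omega) (by omega), ← hdd]
          · -- the run reaches the end of the list: the segment is the whole remainder
            have hkfull : (order.drop (i + 1)).length = k := by omega
            have hnext : pvNextB order i = i + (k + 1) := by
              unfold pvNextB; rw [hscan, hK, if_neg hjn]
            have hslice : PySem.List.slice order (some (i : Int))
                (some ((i + (k + 1) : Nat) : Int)) =
                order[i] :: (order.drop (i + 1)).take (k + 1) := by
              rw [PySem.List.slice_natCast]
              have hsub : i + (k + 1) - i = k + 1 := by omega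
              rw [hsub, hd, List.take_succ_cons,
                List.take_of_length_le (by omega), List.take_of_length_le (by omega)]
            have hd1 : order.drop (i + (k + 1)) = ([] : List Int) :=
              List.drop_eq_nil_of_le (by omega)
            have hd2 : (order.drop (i + 1)).drop (k + 1) = ([] : List Int) :=
              List.drop_eq_nil_of_le (by omega)
            rw [hnext, hslice, ih fuel2' (i + (k + 1)) (by omega) (by omega), hd1, hd2]
      · rw [if_neg hi]
        have : order.drop i = [] := List.drop_eq_nil_of_le (by omega)
        cases fuel2 <;> simp [pvRefBuild, this]

-- ===== VERDICT (by name: the statement is the Claim_ definition above) =====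
theorem groupNums_spec : Claim_equal_groupNums := by
  intro nums _
  unfold Spec_groupNums groupNums groupNums_alt
  rw [pvOuterA_build _ nums.length _ _ (by simp [PySem.List.length_sorted])
    (by simp [PySem.List.length_sorted])]
  rw [pvLoopB_eq_ref _ _ (PySem.List.sorted nums (fun x => PySem.Int.bitCount x) true).length 0
    (by simp) (by simp)]
  simp
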